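-- pv_equiv track=rewrite | github.com/OnionContainer/4P78_LabBasic | ColorfulGameOfLife/LifeFrameAnalysis.py | find_related_island_pairs
-- ===== SOURCE A (Python) =====
-- def get_influence_area(island):
--     influence = set()
--     for x, y in island:
--         for dx in range(-2, 3):
--             for dy in range(-2, 3):
--                 influence.add((x + dx, y + dy))
--     return influence
--
-- def find_related_island_pairs(islands1, islands2):
--     related_pairs = []
--     influences1 = [get_influence_area(island) for island in islands1]
--     influences2 = [get_influence_area(island) for island in islands2]
--
--     for i, inf1 in enumerate(influences1):
--         for j, inf2 in enumerate(influences2):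
--             if inf1 & inf2:  # 非空交集
--                 related_pairs.append((i, j))
--     return related_pairs
-- ===== SOURCE B (Python) =====
-- def find_related_island_pairs(islands1, islands2):
--     # Two dilated-by-2 influence areas overlap iff some cell of one island is
--     # within Chebyshev distance 4 of some cell of the other; test that directly.
--     return [
--         (i, j)
--         for i, a in enumerate(islands1)
--         for j, b in enumerate(islands2)
--         if any(abs(x1 - x2) <= 4 and abs(y1 - y2) <= 4
--                for x1, y1 in a for x2, y2 in b)
--     ]
-- ===== Notes on version B (the rewrite author's own statement) =====
-- stated objective: simpler
-- what changed: Drops the dilated influence-set construction and set intersection entirely: two 2-dilated influence areas overlap iff some pair of cells is within Chebyshev distance 4, so B is a single comprehension with a direct pairwise distance test and early exit.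
import Mathlib
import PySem

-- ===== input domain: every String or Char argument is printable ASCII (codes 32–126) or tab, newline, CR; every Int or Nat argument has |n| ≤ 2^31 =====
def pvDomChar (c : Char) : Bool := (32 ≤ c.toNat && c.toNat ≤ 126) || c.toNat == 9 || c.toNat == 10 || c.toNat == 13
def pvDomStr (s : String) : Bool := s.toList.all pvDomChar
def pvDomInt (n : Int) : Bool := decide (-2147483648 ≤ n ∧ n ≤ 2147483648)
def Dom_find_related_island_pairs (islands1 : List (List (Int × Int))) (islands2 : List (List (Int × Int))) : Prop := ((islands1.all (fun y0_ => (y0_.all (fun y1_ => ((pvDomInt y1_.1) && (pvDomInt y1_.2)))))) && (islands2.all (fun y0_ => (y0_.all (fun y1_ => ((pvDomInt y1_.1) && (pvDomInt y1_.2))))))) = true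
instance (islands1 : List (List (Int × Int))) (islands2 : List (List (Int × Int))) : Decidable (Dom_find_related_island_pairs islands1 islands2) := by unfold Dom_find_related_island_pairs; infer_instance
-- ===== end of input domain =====

-- B drops A's dilated influence-set construction and set intersection in favour of a
-- direct pairwise Chebyshev-distance (≤ 4) test on the islands' cells (simpler, no sets).

-- ===== PORT A =====
def get_influence_area (island : List (Int × Int)) : PySem.Set (Int × Int) :=
  island.foldl
    (fun influence p =>
      (PySem.List.pyRange (-2) 3 1).foldl
        (fun influence dx =>
          (PySem.List.pyRange (-2) 3 1).foldl
            (fun influence dy => PySem.Set.add influence (p.1 + dx, p.2 + dy))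
            influence)
        influence)
    PySem.Set.empty

def find_related_island_pairs (islands1 : List (List (Int × Int))) (islands2 : List (List (Int × Int))) : List (Int × Int) :=
  let influences1 := islands1.map (fun island => get_influence_area island)
  let influences2 := islands2.map (fun island => get_influence_area island)
  (PySem.List.enumerate influences1 0).foldl
    (fun related_pairs ip =>
      (PySem.List.enumerate influences2 0).foldl
        (fun related_pairs jp =>
          -- 'if inf1 & inf2:' — truthiness of a set = nonempty intersection
          if !(PySem.Set.inter ip.2 jp.2).isEmpty then related_pairs ++ [(ip.1, jp.1)]
          else related_pairs)
        related_pairs)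
    []

-- ===== PORT B =====
-- 'any(abs(x1-x2) <= 4 and abs(y1-y2) <= 4 for x1, y1 in a for x2, y2 in b)'
def pvClose (a b : List (Int × Int)) : Bool :=
  a.any (fun p => b.any (fun q => decide (|p.1 - q.1| ≤ 4 ∧ |p.2 - q.2| ≤ 4)))

def find_related_island_pairs_alt (islands1 : List (List (Int × Int))) (islands2 : List (List (Int × Int))) : List (Int × Int) :=
  (PySem.List.enumerate islands1 0).flatMap
    (fun ia =>
      ((PySem.List.enumerate islands2 0).filter (fun jb => pvClose ia.2 jb.2)).map
        (fun jb => (ia.1, jb.1)))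

-- ===== PRECONDITION & SPEC =====
def Spec_find_related_island_pairs (islands1 : List (List (Int × Int))) (islands2 : List (List (Int × Int))) (out : List (Int × Int)) : Prop := out = find_related_island_pairs_alt islands1 islands2
instance (islands1 : List (List (Int × Int))) (islands2 : List (List (Int × Int))) (out : List (Int × Int)) : Decidable (Spec_find_related_island_pairs islands1 islands2 out) := by unfold Spec_find_related_island_pairs; infer_instance

-- ===== CLAIM (what is proved, stated in full; the proofs are below) =====
def Claim_equal_find_related_island_pairs : Prop := ∀ (islands1 : List (List (Int × Int))) (islands2 : List (List (Int × Int))), Dom_find_related_island_pairs islands1 islands2 → Spec_find_related_island_pairs islands1 islands2 (find_related_island_pairs islands1 islands2)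

-- ===== LEMMAS AND PROOFS =====

-- generic: membership in a foldl whose step adds exactly the elements satisfying P b
theorem pv_mem_foldl_step {α β : Type} (step : List α → β → List α) (P : β → α → Prop)
    (h : ∀ acc b y, y ∈ step acc b ↔ y ∈ acc ∨ P b y) :
    ∀ (l : List β) (acc : List α) (y : α), y ∈ l.foldl step acc ↔ y ∈ acc ∨ ∃ b ∈ l, P b y := by
  intro l
  induction l with
  | nil => simp
  | cons b l ih =>
    intro acc y
    rw [List.foldl_cons, ih, h]
    simp
    tauto

theorem pv_mem_gia (island : List (Int × Int)) (c : Int × Int) :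
    c ∈ get_influence_area island ↔ ∃ q ∈ island, |c.1 - q.1| ≤ 2 ∧ |c.2 - q.2| ≤ 2 := by
  unfold get_influence_area
  rw [pv_mem_foldl_step _
      (fun q y => ∃ dx ∈ PySem.List.pyRange (-2) 3 1, ∃ dy ∈ PySem.List.pyRange (-2) 3 1,
        y = (q.1 + dx, q.2 + dy))
      (by
        intro acc q y
        exact pv_mem_foldl_step _
          (fun dx y => ∃ dy ∈ PySem.List.pyRange (-2) 3 1, y = (q.1 + dx, q.2 + dy))
          (by intro acc2 dx y; exact PySem.Set.mem_foldl_add _ _ _ _)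
          _ acc y)]
  simp only [PySem.Set.empty, List.not_mem_nil, false_or]
  constructor
  · rintro ⟨q, hq, dx, hdx, dy, hdy, rfl⟩
    rw [PySem.List.mem_pyRange_one] at hdx hdy
    exact ⟨q, hq, by simp [abs_le]; omega, by simp [abs_le]; omega⟩
  · rintro ⟨q, hq, h1, h2⟩
    rw [abs_le] at h1 h2
    refine ⟨q, hq, c.1 - q.1, ?_, c.2 - q.2, ?_, ?_⟩
    · rw [PySem.List.mem_pyRange_one]; omega
    · rw [PySem.List.mem_pyRange_one]; omega
    · simp

theorem pv_cond_eq (a b : List (Int × Int)) :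
    (!(PySem.Set.inter (get_influence_area a) (get_influence_area b)).isEmpty) = pvClose a b := by
  rw [Bool.eq_iff_iff]
  rw [Bool.not_eq_eq_eq_not, Bool.not_true, List.isEmpty_eq_false_iff_exists_mem]
  simp only [PySem.Set.mem_inter, pv_mem_gia, pvClose, List.any_eq_true, decide_eq_true_eq]
  constructor
  · rintro ⟨c, ⟨p, hp, hp1, hp2⟩, ⟨q, hq, hq1, hq2⟩⟩
    rw [abs_le] at hp1 hp2 hq1 hq2
    exact ⟨p, hp, q, hq, by rw [abs_le]; omega, by rw [abs_le]; omega⟩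
  · rintro ⟨p, hp, q, hq, h1, h2⟩
    rw [abs_le] at h1 h2
    refine ⟨(p.1 + max (-2) (min 2 (q.1 - p.1)), p.2 + max (-2) (min 2 (q.2 - p.2))),
      ⟨p, hp, by simp [abs_le], by simp [abs_le]⟩,
      ⟨q, hq, by simp [abs_le]; omega, by simp [abs_le]; omega⟩⟩

theorem pv_enumerate_map {α β : Type} (f : α → β) (xs : List α) (s : Int) :
    PySem.List.enumerate (xs.map f) s = (PySem.List.enumerate xs s).map (fun p => (p.1, f p.2)) := by
  induction xs generalizing s with
  | nil => simp [PySem.List.enumerate]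
  | cons x xs ih => simp [PySem.List.enumerate_cons, ih]

-- ===== VERDICT (by name: the statement is the Claim_ definition above) =====
theorem find_related_island_pairs_spec : Claim_equal_find_related_island_pairs := by
  intro islands1 islands2 _
  unfold Spec_find_related_island_pairs find_related_island_pairs find_related_island_pairs_alt
  simp only [pv_enumerate_map, PySem.List.foldl_append_if, PySem.List.foldl_append_eq_flatMap,
    List.nil_append, List.flatMap_map, List.filter_map, List.map_map]
  apply List.flatMap_congr
  intro ia _
  simp [Function.comp_def, pv_cond_eq]
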